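-- pv_equiv track=rewrite | github.com/da-steve101/radio_modulation | subexpression_elim/hardware_aware_sub_elim.py | implement_lyr1_op
-- ===== SOURCE A (Python) =====
-- def implement_lyr1_op( no_in, op_cntr, op_code, input_idxs ):
--     assert sum([ x < no_in for x in input_idxs ]) == len( input_idxs ), "Can only be used in first layer"
--     no_ops = len(input_idxs)
--     if no_ops < 7:
--         # pass all into one op
--         op = [ op_cntr] + input_idxs + [ -1 ]*(6 - no_ops) + [ op_code ]
--         op_cntr += 1
--         return op_cntr, [ op ]
--     ops = []
--     while len( input_idxs ) > 0:
--         op_cntr, ops_new = implement_lyr1_op( no_in, op_cntr, op_code & (( 1 << 6 ) - 1), input_idxs[:6] )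
--         ops += ops_new
--         input_idxs = input_idxs[6:]
--         op_code = op_code >> 6
--     return op_cntr, ops
-- ===== SOURCE B (Python) =====
-- def implement_lyr1_op( no_in, op_cntr, op_code, input_idxs ):
--     assert sum([ x < no_in for x in input_idxs ]) == len( input_idxs ), "Can only be used in first layer"
--     no_ops = len(input_idxs)
--     if no_ops < 7:
--         # pass all into one op (op_code left unmasked, as in the original)
--         return op_cntr + 1, [ [ op_cntr ] + input_idxs + [ -1 ]*(6 - no_ops) + [ op_code ] ]
--     # one op per 6-input chunk; counter and mask computed by index arithmetic, no recursion
--     ops = []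
--     for i in range(0, no_ops, 6):
--         chunk = input_idxs[i:i + 6]
--         ops.append([ op_cntr + i // 6 ] + chunk + [ -1 ]*(6 - len(chunk)) + [ (op_code >> i) & 63 ])
--     return op_cntr + (no_ops + 5) // 6, ops
-- ===== Notes on version B (the rewrite author's own statement) =====
-- stated objective: faster
-- what changed: Replaced A's self-recursion plus while-loop (which repeatedly copies the remaining list via input_idxs[6:] each iteration) with a single flat for-loop over chunk start indices, computing each chunk's counter and mask directly by index arithmetic (op_cntr + i//6, (op_code >> i) & 63).
import Mathlib
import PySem

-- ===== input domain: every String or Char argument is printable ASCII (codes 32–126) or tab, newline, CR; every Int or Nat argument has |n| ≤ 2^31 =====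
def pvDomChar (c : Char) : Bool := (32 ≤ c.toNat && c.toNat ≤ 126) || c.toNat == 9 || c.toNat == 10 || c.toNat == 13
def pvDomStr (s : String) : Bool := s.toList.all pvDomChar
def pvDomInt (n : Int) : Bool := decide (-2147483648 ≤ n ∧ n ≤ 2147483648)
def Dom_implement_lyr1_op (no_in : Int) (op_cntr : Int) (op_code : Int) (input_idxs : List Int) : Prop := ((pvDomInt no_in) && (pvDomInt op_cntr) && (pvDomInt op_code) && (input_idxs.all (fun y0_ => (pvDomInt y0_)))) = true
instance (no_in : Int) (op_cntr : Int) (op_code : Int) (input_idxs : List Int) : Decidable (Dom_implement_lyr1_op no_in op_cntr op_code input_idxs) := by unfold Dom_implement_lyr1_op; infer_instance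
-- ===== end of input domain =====

-- B replaces A's recursion-plus-while with a single indexed loop over 6-element chunks,
-- computing each chunk's counter and mask by index arithmetic (objective: simpler).


-- ===== PORT A =====
-- slice facts used by the port's termination argument and the proofs
theorem slice_take6 (xs : List Int) : PySem.List.slice xs none (some 6) = xs.take 6 := by
  rw [PySem.List.slice_to xs (show (0:Int) ≤ 6 by norm_num)]; rfl

theorem slice_drop6 (xs : List Int) : PySem.List.slice xs (some 6) none = xs.drop 6 := by
  rw [PySem.List.slice_from xs (show (0:Int) ≤ 6 by norm_num)]; rfl

-- The Python function is self-recursive with a while loop in the recursive branch;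
-- the while loop becomes the mutually recursive helper lyr1_while (same state: op_cntr, op_code, input_idxs, ops).
mutual
def implement_lyr1_op (no_in : Int) (op_cntr : Int) (op_code : Int) (input_idxs : List Int) : Int × List (List Int) :=
  -- the assert passes exactly on Pre_; it is not modelled here
  if input_idxs.length < 7 then
    (op_cntr + 1, [[op_cntr] ++ input_idxs ++ List.replicate (6 - input_idxs.length) (-1) ++ [op_code]])
  else
    lyr1_while no_in op_cntr op_code input_idxs []
termination_by if input_idxs.length < 7 then 0 else input_idxs.length + 1
decreasing_by
  rename_i h
  simp only [if_neg h]
  omega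

def lyr1_while (no_in : Int) (op_cntr : Int) (op_code : Int) (input_idxs : List Int) (ops : List (List Int)) : Int × List (List Int) :=
  if 0 < input_idxs.length then
    let r := implement_lyr1_op no_in op_cntr (PySem.Int.band op_code ((1 <<< (6 : Nat)) - 1)) (PySem.List.slice input_idxs none (some 6))
    lyr1_while no_in r.1 (op_code >>> (6 : Nat)) (PySem.List.slice input_idxs (some 6) none) (ops ++ r.2)
  else (op_cntr, ops)
termination_by input_idxs.length
decreasing_by
  · rw [slice_take6]
    have h1 : (input_idxs.take 6).length < 7 := by
      rw [List.length_take]; omega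
    simp only [if_pos h1]
    omega
  · rw [slice_drop6]
    simp only [List.length_drop]
    omega
end

-- ===== PORT B =====
def implement_lyr1_op_alt (no_in : Int) (op_cntr : Int) (op_code : Int) (input_idxs : List Int) : Int × List (List Int) :=
  let no_ops : Int := input_idxs.length
  if no_ops < 7 then
    (op_cntr + 1, [[op_cntr] ++ input_idxs ++ List.replicate (6 - input_idxs.length) (-1) ++ [op_code]])
  else
    -- for i in range(0, no_ops, 6): ops.append(...)  — i ≥ 0 always, so i.toNat is Python's shift amount exactly
    let ops := (PySem.List.pyRange 0 no_ops 6).foldl (fun ops i =>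
      let chunk := PySem.List.slice input_idxs (some i) (some (i + 6))
      ops ++ [[op_cntr + PySem.Int.floordiv i 6] ++ chunk ++ List.replicate (6 - chunk.length) (-1)
              ++ [PySem.Int.band (op_code >>> i.toNat) 63]]) []
    (op_cntr + PySem.Int.floordiv (no_ops + 5) 6, ops)

-- ===== PRECONDITION & SPEC =====
-- Pre_ excludes exactly the inputs on which A's assert fails (some index ≥ no_in): AssertionError.
def Pre_implement_lyr1_op (no_in : Int) (op_cntr : Int) (op_code : Int) (input_idxs : List Int) : Prop :=
  ∀ x ∈ input_idxs, x < no_in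
instance (no_in : Int) (op_cntr : Int) (op_code : Int) (input_idxs : List Int) : Decidable (Pre_implement_lyr1_op no_in op_cntr op_code input_idxs) := by unfold Pre_implement_lyr1_op; infer_instance

def pvWitness_implement_lyr1_op : Int × Int × Int × List Int := (5, 0, 77, [0, 1, 2])

def Spec_implement_lyr1_op (no_in : Int) (op_cntr : Int) (op_code : Int) (input_idxs : List Int) (out : Int × List (List Int)) : Prop := out = implement_lyr1_op_alt no_in op_cntr op_code input_idxs
instance (no_in : Int) (op_cntr : Int) (op_code : Int) (input_idxs : List Int) (out : Int × List (List Int)) : Decidable (Spec_implement_lyr1_op no_in op_cntr op_code input_idxs out) := by unfold Spec_implement_lyr1_op; infer_instance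

-- ===== CLAIM (what is proved, stated in full; the proofs are below) =====
def Claim_equal_implement_lyr1_op : Prop := ∀ (no_in : Int) (op_cntr : Int) (op_code : Int) (input_idxs : List Int), Dom_implement_lyr1_op no_in op_cntr op_code input_idxs → Pre_implement_lyr1_op no_in op_cntr op_code input_idxs → Spec_implement_lyr1_op no_in op_cntr op_code input_idxs (implement_lyr1_op no_in op_cntr op_code input_idxs)

-- ===== LEMMAS AND PROOFS =====

-- the op produced for the k-th 6-element chunk of xs
def chunkOp (c code : Int) (xs : List Int) (k : Nat) : List Int :=
  [c + (k : Int)] ++ (xs.drop (6*k)).take 6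
    ++ List.replicate (6 - ((xs.drop (6*k)).take 6).length) (-1)
    ++ [PySem.Int.band (code >>> (6*k)) 63]

theorem mask_eq : ((1 <<< (6 : Nat)) - 1 : Int) = 63 := by decide

theorem impl_base (no_in c code : Int) (xs : List Int) (h : xs.length < 7) :
    implement_lyr1_op no_in c code xs
      = (c + 1, [[c] ++ xs ++ List.replicate (6 - xs.length) (-1) ++ [code]]) := by
  rw [implement_lyr1_op.eq_def, if_pos h]

theorem while_nil (no_in c code : Int) (acc : List (List Int)) :
    lyr1_while no_in c code [] acc = (c, acc) := by
  rw [lyr1_while.eq_def]; simp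

theorem chunkOp_zero (c code : Int) (xs : List Int) :
    chunkOp c code xs 0
      = [c] ++ xs.take 6 ++ List.replicate (6 - (xs.take 6).length) (-1) ++ [PySem.Int.band code 63] := by
  simp [chunkOp]

theorem chunkOp_succ (c code : Int) (xs : List Int) (k : Nat) :
    chunkOp c code xs (k+1) = chunkOp (c+1) (code >>> (6:Nat)) (xs.drop 6) k := by
  unfold chunkOp
  have hdd : (xs.drop 6).drop (6*k) = xs.drop (6*(k+1)) := by
    rw [List.drop_drop]; congr 1; ring
  have hsh : code >>> (6*(k+1)) = (code >>> (6:Nat)) >>> (6*k) := by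
    rw [show 6*(k+1) = 6 + 6*k by ring]
    exact Int.shiftRight_add code 6 (6*k)
  rw [hdd, hsh]
  have hc : c + ((k+1 : Nat) : Int) = (c + 1) + (k : Int) := by push_cast; ring
  rw [hc]

theorem while_eq (n : Nat) : ∀ (xs : List Int), xs.length = n → 0 < n →
    ∀ (no_in c code : Int) (acc : List (List Int)),
    lyr1_while no_in c code xs acc
      = (c + ((xs.length : Int) + 5) / 6,
         acc ++ (List.range ((xs.length + 5) / 6)).map (chunkOp c code xs)) := by
  induction n using Nat.strong_induction_on with
  | _ n ih =>
    intro xs hlen hpos no_in c code acc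
    rw [lyr1_while.eq_def]
    have hx : 0 < xs.length := by omega
    rw [if_pos hx]
    rw [slice_take6, slice_drop6]
    have htk : (xs.take 6).length < 7 := by rw [List.length_take]; omega
    rw [impl_base no_in c _ _ htk, mask_eq]
    by_cases hle : xs.length ≤ 6
    · -- one chunk: the drop is empty and the loop stops
      have hdrop : xs.drop 6 = [] := by
        apply List.eq_nil_of_length_eq_zero; rw [List.length_drop]; omega
      rw [hdrop, while_nil]
      have hm : (xs.length + 5) / 6 = 1 := by omega
      have hint : ((xs.length : Int) + 5) / 6 = 1 := by omega
      rw [hm, hint, List.range_one, List.map_cons, List.map_nil, chunkOp_zero,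
        List.take_of_length_le hle]
    · -- at least two chunks: apply the IH to xs.drop 6
      have hdl : (xs.drop 6).length = n - 6 := by rw [List.length_drop]; omega
      rw [ih (n - 6) (by omega) (xs.drop 6) hdl (by omega)]
      have hcnt : (c + 1) + (((xs.drop 6).length : Int) + 5) / 6
          = c + ((xs.length : Int) + 5) / 6 := by
        simp only [List.length_drop]
        have : ((xs.length - 6 : Nat) : Int) = (xs.length : Int) - 6 := by omega
        rw [this]; omega
      have hcnt2 : (xs.length + 5) / 6 = ((xs.drop 6).length + 5) / 6 + 1 := by
        simp only [List.length_drop]; omega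
      rw [hcnt, hcnt2, List.range_succ_eq_map, List.map_cons, List.map_map, chunkOp_zero]
      have hmaps : (List.map (chunkOp c code xs ∘ Nat.succ) (List.range (((xs.drop 6).length + 5) / 6)))
          = List.map (chunkOp (c+1) (code >>> (6:Nat)) (xs.drop 6)) (List.range (((xs.drop 6).length + 5) / 6)) := by
        apply List.map_congr_left
        intro k _
        simp only [Function.comp_apply, Nat.succ_eq_add_one]
        exact chunkOp_succ c code xs k
      rw [hmaps]
      simp

theorem range_count_eq (len : Nat) :
    ((((len : Int)) - 0 + 6 - 1) / 6).toNat = (len + 5) / 6 := by omega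

theorem alt_big (no_in c code : Int) (xs : List Int) (h : ¬ (xs.length : Int) < 7) :
    implement_lyr1_op_alt no_in c code xs
      = (c + ((xs.length : Int) + 5) / 6,
         (List.range ((xs.length + 5) / 6)).map (chunkOp c code xs)) := by
  rw [implement_lyr1_op_alt]
  simp only [if_neg h]
  rw [PySem.List.foldl_append_singleton_eq_map]
  rw [PySem.List.pyRange_of_pos 0 (xs.length : Int) (by omega)]
  rw [if_pos (by omega : (0:Int) < (xs.length : Int)), range_count_eq]
  simp only [List.map_map, List.nil_append, Prod.mk.injEq]
  refine ⟨?_, ?_⟩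
  · rw [PySem.Int.floordiv_eq_ediv_of_pos (by norm_num)]
  · apply List.map_congr_left
    intro k _
    simp only [Function.comp_apply, chunkOp]
    have h0 : (0 : Int) + 6 * (k : Int) = ((6*k : Nat) : Int) := by push_cast; ring
    rw [h0]
    have hslice : PySem.List.slice xs (some ((6*k : Nat) : Int)) (some (((6*k : Nat) : Int) + 6))
        = (xs.drop (6*k)).take 6 := by
      have h6 : (((6*k : Nat) : Int) + 6) = (((6*k : Nat) : Int) + ((6 : Nat) : Int)) := by norm_num
      rw [h6, PySem.List.slice_natCast_add]
    rw [hslice]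
    have hfd : PySem.Int.floordiv ((6*k : Nat) : Int) 6 = (k : Int) := by
      rw [PySem.Int.floordiv_eq_ediv_of_pos (by norm_num)]; omega
    have htn : (((6*k : Nat) : Int)).toNat = 6*k := by omega
    rw [hfd, htn]

-- ===== VERDICT (by name: the statement is the Claim_ definition above) =====
theorem implement_lyr1_op_spec : Claim_equal_implement_lyr1_op := by
  intro no_in c code xs _ _
  unfold Spec_implement_lyr1_op
  by_cases h : xs.length < 7
  · rw [impl_base no_in c code xs h, implement_lyr1_op_alt]
    rw [if_pos (show ((xs.length : Int)) < 7 by exact_mod_cast h)]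
  · rw [implement_lyr1_op.eq_def, if_neg h]
    rw [while_eq xs.length xs rfl (by omega) no_in c code []]
    rw [alt_big no_in c code xs (by exact_mod_cast h)]
    simp
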